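-- pv_equiv track=rewrite | github.com/FedericoGiraudo/TPSIT_2020-21 | Python/pavimento_1_1.py | numeraPiastrelle
-- ===== SOURCE A (Python) =====
-- OSTACOLO = -1
--
-- def numeraPiastrelle(p):
--     pavimentoNumerato = []
--     cont = -1
--
--     for riga in p:
--         nuovaRiga = []
--         for piastrella in riga:
--             if piastrella == 0:
--                 cont = cont + 1
--                 nuovaRiga.append(cont)
--             else:
--                 nuovaRiga.append(OSTACOLO)
--         pavimentoNumerato.append(nuovaRiga)
--     return pavimentoNumerato
-- ===== SOURCE B (Python) =====
-- OSTACOLO = -1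
--
-- def numeraPiastrelle(p):
--     # Two-pass: per-row free counts -> prefix-sum offsets, then fill each row independently.
--     counts = [sum(1 for x in row if x == 0) for row in p]
--     offsets = []
--     t = 0
--     for c in counts:
--         offsets.append(t)
--         t += c
--     out = []
--     for off, row in zip(offsets, p):
--         k = off
--         new = []
--         for x in row:
--             if x == 0:
--                 new.append(k)
--                 k += 1
--             else:
--                 new.append(OSTACOLO)
--         out.append(new)
--     return out
-- ===== Notes on version B (the rewrite author's own statement) =====
-- stated objective: alternative
-- what changed: Replaces the single counter threaded through all rows by a two-pass scheme: first compute per-row free-tile counts and prefix-sum offsets, then fill each row independently from its offset.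
import Mathlib
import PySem

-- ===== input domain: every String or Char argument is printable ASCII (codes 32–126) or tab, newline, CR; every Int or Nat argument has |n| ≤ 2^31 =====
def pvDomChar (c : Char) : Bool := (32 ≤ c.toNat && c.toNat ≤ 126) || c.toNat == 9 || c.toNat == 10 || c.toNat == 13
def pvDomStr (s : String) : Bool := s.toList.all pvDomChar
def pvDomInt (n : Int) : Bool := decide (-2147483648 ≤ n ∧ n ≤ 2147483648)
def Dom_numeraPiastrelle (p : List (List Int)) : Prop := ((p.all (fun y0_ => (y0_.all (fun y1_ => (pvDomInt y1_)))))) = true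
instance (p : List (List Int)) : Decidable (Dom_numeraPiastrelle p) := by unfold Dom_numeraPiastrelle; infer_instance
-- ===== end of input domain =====

-- B replaces A's single threaded counter by a two-pass scheme (per-row counts, prefix-sum
-- offsets, then independent row fill); same cost, different decomposition.


-- ===== PORT A =====
-- A threads (cont, pavimentoNumerato) through both loops; inner loop threads (cont, nuovaRiga).
def numeraPiastrelle (p : List (List Int)) : List (List Int) :=
  (p.foldl (fun (s : Int × List (List Int)) riga =>
    let r := riga.foldl (fun (t : Int × List Int) piastrella =>
      if piastrella = 0 then (t.1 + 1, t.2 ++ [t.1 + 1]) else (t.1, t.2 ++ [-1])) (s.1, [])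
    (r.1, s.2 ++ [r.2])) (-1, [])).2

-- ===== PORT B =====
-- B: per-row zero counts, prefix-sum offsets, then each row filled from its own offset.
def numeraPiastrelle_alt (p : List (List Int)) : List (List Int) :=
  let counts := p.map (fun row => row.foldl (fun (n : Int) x => if x = 0 then n + 1 else n) 0)
  let offsets := (counts.foldl (fun (s : Int × List Int) c => (s.1 + c, s.2 ++ [s.1])) (0, [])).2
  (offsets.zip p).foldl (fun (out : List (List Int)) op =>
    out ++ [(op.2.foldl (fun (t : Int × List Int) x =>
      if x = 0 then (t.1 + 1, t.2 ++ [t.1]) else (t.1, t.2 ++ [-1])) (op.1, [])).2]) []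

-- ===== PRECONDITION & SPEC =====
def Spec_numeraPiastrelle (p : List (List Int)) (out : List (List Int)) : Prop := out = numeraPiastrelle_alt p
instance (p : List (List Int)) (out : List (List Int)) : Decidable (Spec_numeraPiastrelle p out) := by unfold Spec_numeraPiastrelle; infer_instance

-- ===== CLAIM (what is proved, stated in full; the proofs are below) =====
def Claim_equal_numeraPiastrelle : Prop := ∀ (p : List (List Int)), Dom_numeraPiastrelle p → Spec_numeraPiastrelle p (numeraPiastrelle p)

-- ===== LEMMAS AND PROOFS =====

-- number of zeros in a row, as a recursive spec
def pvCnt : List Int → Int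
  | [] => 0
  | x :: xs => (if x = 0 then 1 else 0) + pvCnt xs

-- the numbered row when the next free number is k
def pvFill (k : Int) : List Int → List Int
  | [] => []
  | x :: xs => if x = 0 then k :: pvFill (k + 1) xs else -1 :: pvFill k xs

-- the numbered grid when the next free number is k
def pvRows (k : Int) : List (List Int) → List (List Int)
  | [] => []
  | r :: rs => pvFill k r :: pvRows (k + pvCnt r) rs

-- offsets produced from the counts list, starting at t
def pvOffs (t : Int) : List Int → List Int
  | [] => []
  | c :: cs => t :: pvOffs (t + c) cs

lemma cnt_fold (r : List Int) : ∀ n : Int,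
    r.foldl (fun (n : Int) x => if x = 0 then n + 1 else n) n = n + pvCnt r := by
  induction r with
  | nil => intro n; simp [pvCnt]
  | cons x xs ih =>
    intro n
    simp only [List.foldl, pvCnt]
    split_ifs with h <;> rw [ih] <;> ring

lemma fillA_fold (r : List Int) : ∀ (c : Int) (acc : List Int),
    r.foldl (fun (t : Int × List Int) x =>
      if x = 0 then (t.1 + 1, t.2 ++ [t.1 + 1]) else (t.1, t.2 ++ [-1])) (c, acc)
    = (c + pvCnt r, acc ++ pvFill (c + 1) r) := by
  induction r with
  | nil => intro c acc; simp [pvCnt, pvFill]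
  | cons x xs ih =>
    intro c acc
    simp only [List.foldl, pvCnt, pvFill]
    split_ifs with h
    · rw [ih]
      simp only [Prod.mk.injEq]
      exact ⟨by ring, by simp⟩
    · rw [ih]; simp

lemma fillB_fold (r : List Int) : ∀ (k : Int) (acc : List Int),
    r.foldl (fun (t : Int × List Int) x =>
      if x = 0 then (t.1 + 1, t.2 ++ [t.1]) else (t.1, t.2 ++ [-1])) (k, acc)
    = (k + pvCnt r, acc ++ pvFill k r) := by
  induction r with
  | nil => intro k acc; simp [pvCnt, pvFill]
  | cons x xs ih =>
    intro k acc
    simp only [List.foldl, pvCnt, pvFill]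
    split_ifs with h
    · rw [ih]
      simp only [Prod.mk.injEq]
      exact ⟨by ring, by simp⟩
    · rw [ih]; simp

lemma outerA_fold (p : List (List Int)) : ∀ (c : Int) (rows : List (List Int)),
    (p.foldl (fun (s : Int × List (List Int)) riga =>
      let r := riga.foldl (fun (t : Int × List Int) piastrella =>
        if piastrella = 0 then (t.1 + 1, t.2 ++ [t.1 + 1]) else (t.1, t.2 ++ [-1])) (s.1, [])
      (r.1, s.2 ++ [r.2])) (c, rows))
    = ((p.foldl (fun (s : Int × List (List Int)) riga =>
      let r := riga.foldl (fun (t : Int × List Int) piastrella =>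
        if piastrella = 0 then (t.1 + 1, t.2 ++ [t.1 + 1]) else (t.1, t.2 ++ [-1])) (s.1, [])
      (r.1, s.2 ++ [r.2])) (c, rows)).1, rows ++ pvRows (c + 1) p) := by
  induction p with
  | nil => intro c rows; simp [pvRows]
  | cons r rs ih =>
    intro c rows
    simp only [List.foldl, pvRows]
    rw [fillA_fold]
    rw [ih]
    have : c + pvCnt r + 1 = c + 1 + pvCnt r := by ring
    simp [this]

lemma offs_fold (cs : List Int) : ∀ (t : Int) (acc : List Int),
    (cs.foldl (fun (s : Int × List Int) c => (s.1 + c, s.2 ++ [s.1])) (t, acc)).2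
    = acc ++ pvOffs t cs := by
  induction cs with
  | nil => intro t acc; simp [pvOffs]
  | cons c cs ih =>
    intro t acc
    simp only [List.foldl, pvOffs]
    rw [ih]; simp

lemma zip_fold (p : List (List Int)) : ∀ (t : Int) (acc : List (List Int)),
    (((pvOffs t (p.map pvCnt)).zip p).foldl (fun (out : List (List Int)) op =>
      out ++ [(op.2.foldl (fun (t : Int × List Int) x =>
        if x = 0 then (t.1 + 1, t.2 ++ [t.1]) else (t.1, t.2 ++ [-1])) (op.1, [])).2]) acc)
    = acc ++ pvRows t p := by
  induction p with
  | nil => intro t acc; simp [pvOffs, pvRows]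
  | cons r rs ih =>
    intro t acc
    simp only [List.map, pvOffs, List.zip_cons_cons, List.foldl, pvRows]
    rw [fillB_fold]
    rw [ih]
    simp

lemma counts_eq (p : List (List Int)) :
    p.map (fun row => row.foldl (fun (n : Int) x => if x = 0 then n + 1 else n) 0) = p.map pvCnt := by
  apply List.map_congr_left
  intro r _
  rw [cnt_fold]; ring

-- ===== VERDICT (by name: the statement is the Claim_ definition above) =====
theorem numeraPiastrelle_spec : Claim_equal_numeraPiastrelle := by
  intro p _
  unfold Spec_numeraPiastrelle numeraPiastrelle numeraPiastrelle_alt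
  rw [outerA_fold, counts_eq]
  have h0 : ((p.map pvCnt).foldl (fun (s : Int × List Int) c => (s.1 + c, s.2 ++ [s.1])) ((0 : Int), ([] : List Int))).2 = pvOffs 0 (p.map pvCnt) := by
    rw [offs_fold]; simp
  simp only [h0]
  rw [zip_fold]
  norm_num
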